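-- pv_equiv track=rewrite | github.com/Mashi007/pagos | backend/app/services/reporte_clientes_hoja.py | _pick_lote_header
-- ===== SOURCE A (Python) =====
-- from typing import Any, List, Optional, Set, Tuple
--
-- def _pick_lote_header(headers: List[str]) -> Optional[str]:
--     for h in headers:
--         hl = (h or "").strip().casefold()
--         if hl == "lote":
--             return h
--     for h in headers:
--         hl = (h or "").strip().casefold()
--         if "lote" in hl:
--             return h
--     return None
-- ===== SOURCE B (Python) =====
-- from typing import List, Optional
--
-- def _pick_lote_header(headers: List[str]) -> Optional[str]:
--     # Single pass: return immediately on an exact 'lote' match; remember the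
--     # first substring match as a fallback returned after the scan.
--     candidate = None
--     for h in headers:
--         hl = (h or "").strip().casefold()
--         if hl == "lote":
--             return h
--         if candidate is None and "lote" in hl:
--             candidate = h
--     return candidate
-- ===== Notes on version B (the rewrite author's own statement) =====
-- stated objective: simpler
-- what changed: Replaces A's two full passes over headers with a single pass that returns immediately on an exact 'lote' match and keeps the first substring match as a fallback accumulator.
import Mathlib
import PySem

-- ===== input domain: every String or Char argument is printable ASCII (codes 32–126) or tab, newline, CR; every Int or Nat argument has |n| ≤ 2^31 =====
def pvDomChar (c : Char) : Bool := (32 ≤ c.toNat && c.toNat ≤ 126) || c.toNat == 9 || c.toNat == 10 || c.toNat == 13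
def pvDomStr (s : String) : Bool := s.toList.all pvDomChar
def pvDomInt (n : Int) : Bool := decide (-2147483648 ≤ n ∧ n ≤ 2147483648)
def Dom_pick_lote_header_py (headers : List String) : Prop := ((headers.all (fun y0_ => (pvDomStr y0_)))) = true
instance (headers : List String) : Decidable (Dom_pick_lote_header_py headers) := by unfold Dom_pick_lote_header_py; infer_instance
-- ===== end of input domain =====

-- B replaces A's two full passes with a single pass keeping the first substring
-- match as a fallback accumulator (objective: simpler).


-- ===== PORT A =====
-- casefold is ported as PySem.Str.lower: exact on the ASCII domain.
-- first loop: return the first header whose stripped casefold equals "lote"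
def pvAExact : List String → Option String
  | [] => none
  | h :: t =>
    let hl := PySem.Str.lower (PySem.Str.strip h)   -- (h or "") = h for strings
    if hl = "lote" then some h else pvAExact t

-- second loop: return the first header whose stripped casefold contains "lote"
def pvASub : List String → Option String
  | [] => none
  | h :: t =>
    let hl := PySem.Str.lower (PySem.Str.strip h)
    if PySem.Str.isIn "lote" hl then some h else pvASub t

def pick_lote_header_py (headers : List String) : Option String :=
  match pvAExact headers with
  | some h => some h
  | none =>
    match pvASub headers with
    | some h => some h
    | none => none

-- ===== PORT B =====
-- single pass with a fallback accumulator (candidate)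
def pvBLoop : List String → Option String → Option String
  | [], candidate => candidate
  | h :: t, candidate =>
    let hl := PySem.Str.lower (PySem.Str.strip h)
    if hl = "lote" then some h
    else if candidate.isNone && PySem.Str.isIn "lote" hl then pvBLoop t (some h)
    else pvBLoop t candidate

def pick_lote_header_py_alt (headers : List String) : Option String :=
  pvBLoop headers none

-- ===== PRECONDITION & SPEC =====
def Spec_pick_lote_header_py (headers : List String) (out : Option String) : Prop := out = pick_lote_header_py_alt headers
instance (headers : List String) (out : Option String) : Decidable (Spec_pick_lote_header_py headers out) := by unfold Spec_pick_lote_header_py; infer_instance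

-- ===== CLAIM (what is proved, stated in full; the proofs are below) =====
def Claim_equal_pick_lote_header_py : Prop := ∀ (headers : List String), Dom_pick_lote_header_py headers → Spec_pick_lote_header_py headers (pick_lote_header_py headers)

-- ===== LEMMAS AND PROOFS =====
-- loop invariant: B's single pass equals "exact match, else stored candidate, else first substring match"
theorem pvBLoop_inv (headers : List String) (cand : Option String) :
    pvBLoop headers cand =
      match pvAExact headers with
      | some h => some h
      | none => match cand with
                | some c => some c
                | none => pvASub headers := by
  induction headers generalizing cand with
  | nil => cases cand <;> simp [pvBLoop, pvAExact, pvASub]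
  | cons h t ih =>
    simp only [pvBLoop, pvAExact, pvASub]
    by_cases he : PySem.Str.lower (PySem.Str.strip h) = "lote"
    · simp [he]
    · cases cand with
      | some c => simp [he, ih]
      | none =>
        simp [he, ih]
        split_ifs <;> cases pvAExact t <;> simp

-- ===== VERDICT (by name: the statement is the Claim_ definition above) =====
theorem pick_lote_header_py_spec : Claim_equal_pick_lote_header_py := by
  intro headers _
  unfold Spec_pick_lote_header_py pick_lote_header_py pick_lote_header_py_alt
  rw [pvBLoop_inv]
  cases h1 : pvAExact headers <;> cases h2 : pvASub headers <;> simp
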